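-- pv_equiv track=rewrite | github.com/Alset-Nikolas/YandexAlgorithmTraining5 | lessons/3_SetsAndDictionaries/tasks/H_MatchesAreNotToyChildren/main.py | create_vectors_direction
-- ===== SOURCE A (Python) =====
-- def create_vector(cords: list[int]):
-- 	x1, y1, x2, y2 = cords
-- 	x_start, y_start = x1, y1
-- 	x_end, y_end = x2, y2
-- 	if y_start > y_end or y_start == y_end and x_start > x_end:
-- 		x_start, y_start = x2, y2
-- 		x_end, y_end = x1, y1
-- 	x_move, y_move = x_end - x_start, y_end - y_start
-- 	return (x_start, y_start), (x_move, y_move)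
--
-- def create_vectors_direction(figure_: list[list[int]]):
-- 	vectors_direction = dict()
-- 	for cords in figure_:
-- 		(x_start, y_start), (x_move, y_move) = create_vector(cords)
-- 		if (x_move, y_move) not in vectors_direction:
-- 			vectors_direction[(x_move, y_move)] = []
-- 		vectors_direction[(x_move, y_move)].append((x_start, y_start))
-- 	return vectors_direction
-- ===== SOURCE B (Python) =====
-- def create_vector(cords: list[int]):
-- 	x1, y1, x2, y2 = cords
-- 	x_start, y_start = x1, y1
-- 	x_end, y_end = x2, y2
-- 	if y_start > y_end or y_start == y_end and x_start > x_end: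
-- 		x_start, y_start = x2, y2
-- 		x_end, y_end = x1, y1
-- 	x_move, y_move = x_end - x_start, y_end - y_start
-- 	return (x_start, y_start), (x_move, y_move)
--
-- def create_vectors_direction(figure_: list[list[int]]):
-- 	pairs = [(move, start) for start, move in map(create_vector, figure_)]
-- 	keys = dict.fromkeys(k for k, _ in pairs)
-- 	return {k: [s for kk, s in pairs if kk == k] for k in keys}
-- ===== Notes on version B (the rewrite author's own statement) =====
-- stated objective: alternative
-- what changed: Replaces the incremental dict-building loop (membership test, conditional empty-list insert, append) by a declarative two-pass grouping: map all segments to (direction, start) pairs once, dedup the directions in first-occurrence order with dict.fromkeys, and build each group by a comprehension over the pair list.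
-- outside the precondition, e.g. on create_vectors_direction([[1, 2, 3]]): A raises ValueError, B raises ValueError
import Mathlib
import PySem

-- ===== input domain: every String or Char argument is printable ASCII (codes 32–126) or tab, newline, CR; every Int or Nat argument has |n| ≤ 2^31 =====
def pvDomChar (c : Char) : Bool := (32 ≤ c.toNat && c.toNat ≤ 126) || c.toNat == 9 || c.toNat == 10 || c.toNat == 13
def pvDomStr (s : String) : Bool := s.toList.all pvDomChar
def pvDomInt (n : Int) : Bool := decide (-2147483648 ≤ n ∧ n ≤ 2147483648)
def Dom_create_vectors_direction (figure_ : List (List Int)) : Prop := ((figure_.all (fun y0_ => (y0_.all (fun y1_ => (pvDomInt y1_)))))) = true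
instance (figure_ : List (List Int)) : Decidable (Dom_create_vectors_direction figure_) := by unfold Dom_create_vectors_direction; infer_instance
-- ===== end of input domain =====

-- B replaces A's incremental dict-building loop by a declarative two-pass grouping
-- (map to (direction, start) pairs, dedup the directions, collect each group by a filter); alternative, not faster.

-- ===== PORT A =====
-- shared helper (B's Python keeps create_vector verbatim): port of create_vector.
-- The '_ => ((0,0),(0,0))' branch is unreachable under Pre_ (Python raises ValueError on the unpacking there).
def create_vector (cords : List Int) : (Int × Int) × (Int × Int) :=
  match cords with
  | [x1, y1, x2, y2] =>
    let (x_start, y_start, x_end, y_end) :=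
      if y1 > y2 ∨ (y1 = y2 ∧ x1 > x2) then (x2, y2, x1, y1) else (x1, y1, x2, y2)
    ((x_start, y_start), (x_end - x_start, y_end - y_start))
  | _ => ((0, 0), (0, 0))

def create_vectors_direction (figure_ : List (List Int)) : List (Int × Int × List (Int × Int)) :=
  (figure_.foldl (fun d cords =>
      let v := create_vector cords
      let d' := if d.contains v.2 = false then d.insert v.2 ([] : List (Int × Int)) else d
      d'.modify v.2 [] (· ++ [v.1]))
    (PySem.Dict.empty)).items.map (fun p => (p.1.1, p.1.2, p.2))

-- ===== PORT B =====
def create_vectors_direction_alt (figure_ : List (List Int)) : List (Int × Int × List (Int × Int)) :=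
  let pairs := figure_.map (fun c => ((create_vector c).2, (create_vector c).1))
  let keys := PySem.List.dedup (pairs.map (·.1))
  keys.map (fun k => (k.1, k.2, (pairs.filter (fun p => p.1 == k)).map (·.2)))

-- ===== PRECONDITION & SPEC =====
-- Pre_ excludes inner lists whose length is not 4: Python's unpacking 'x1, y1, x2, y2 = cords' raises ValueError there.
def Pre_create_vectors_direction (figure_ : List (List Int)) : Prop :=
  ∀ c ∈ figure_, c.length = 4
instance (figure_ : List (List Int)) : Decidable (Pre_create_vectors_direction figure_) := by
  unfold Pre_create_vectors_direction; infer_instance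
def pvWitness_create_vectors_direction : List (List Int) := [[0, 0, 1, 1], [2, 2, 1, 1]]

def Spec_create_vectors_direction (figure_ : List (List Int)) (out : List (Int × Int × List (Int × Int))) : Prop := out = create_vectors_direction_alt figure_
instance (figure_ : List (List Int)) (out : List (Int × Int × List (Int × Int))) : Decidable (Spec_create_vectors_direction figure_ out) := by unfold Spec_create_vectors_direction; infer_instance

-- ===== CLAIM (what is proved, stated in full; the proofs are below) =====
def Claim_equal_create_vectors_direction : Prop := ∀ (figure_ : List (List Int)), Dom_create_vectors_direction figure_ → Pre_create_vectors_direction figure_ → Spec_create_vectors_direction figure_ (create_vectors_direction figure_)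

-- ===== LEMMAS AND PROOFS =====

-- A's loop body (conditional empty-insert, then append) is exactly one Dict.modify.
theorem step_eq_modify (d : PySem.Dict (Int × Int) (List (Int × Int))) (k : Int × Int)
    (s : Int × Int) :
    (if d.contains k = false then d.insert k ([] : List (Int × Int)) else d).modify k [] (· ++ [s])
      = d.modify k [] (· ++ [s]) := by
  by_cases h : d.contains k = false
  · simp only [h, if_true, PySem.Dict.modify, PySem.Dict.getD_insert_self,
      PySem.Dict.insert_insert_self]
    rw [PySem.Dict.getD_of_not_contains d [] h]
  · simp [h]

-- ===== VERDICT (by name: the statement is the Claim_ definition above) =====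
theorem create_vectors_direction_spec : Claim_equal_create_vectors_direction := by
  intro figure_ _ _
  unfold Spec_create_vectors_direction create_vectors_direction create_vectors_direction_alt
  have hstep : (fun (d : PySem.Dict (Int × Int) (List (Int × Int))) cords =>
      let v := create_vector cords
      let d' := if d.contains v.2 = false then d.insert v.2 ([] : List (Int × Int)) else d
      d'.modify v.2 [] (· ++ [v.1]))
      = fun d cords => d.modify (create_vector cords).2 [] (· ++ [(create_vector cords).1]) :=
    funext fun d => funext fun c => step_eq_modify d _ _
  rw [hstep]
  set pairs : List ((Int × Int) × (Int × Int)) :=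
    figure_.map (fun c => ((create_vector c).2, (create_vector c).1)) with hp
  have hfold : figure_.foldl
      (fun d cords => d.modify (create_vector cords).2 [] (· ++ [(create_vector cords).1]))
      PySem.Dict.empty
      = pairs.foldl (fun d p => d.modify p.1 [] (· ++ [p.2])) PySem.Dict.empty := by
    rw [hp, List.foldl_map]
  rw [hfold]
  set D := pairs.foldl (fun d p => d.modify p.1 [] (· ++ [p.2])) PySem.Dict.empty with hD
  have hnd : D.keys.Nodup := by
    rw [hD]
    exact PySem.Dict.nodup_keys_foldl_modify_key pairs (·.1) [] (fun _ p => (· ++ [p.2])) _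
      PySem.Dict.nodup_keys_empty
  have hkeys : D.keys = PySem.List.dedup (pairs.map (·.1)) := by
    rw [hD, PySem.Dict.keys_foldl_modify_key pairs (·.1) [] (fun _ p => (· ++ [p.2])) _]
    simp [PySem.Set.update_nil_left]
  have hgetD : ∀ k, D.getD k [] = (pairs.filter (fun p => p.1 == k)).map (·.2) := by
    intro k
    rw [hD, PySem.Dict.getD_foldl_modify_append]
    simp
  rw [PySem.Dict.items_eq_map_keys D hnd [], hkeys, List.map_map]
  exact List.map_congr_left fun k _ => by simp [hgetD k]
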